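-- pv_equiv track=rewrite | github.com/michalz1mniak/Matury | czerwiec2024/rozwiazania/zadanie3/3_2.py | czy
-- ===== SOURCE A (Python) =====
-- def czy(slowo):
--     kod_rot = ''
--     for litera in slowo:
--         kod = ord(litera)
--         if kod + 13 <= 122:
--             kod_rot += chr(kod+13)
--         else:
--             kod_rot += chr(97 + (12 - (122 - kod)))
--     if kod_rot[::-1] == slowo: # [::-1] - odwrocenie slowa
--         return True
--     else: return False
-- ===== SOURCE B (Python) =====
-- def czy(slowo):
--     n = len(slowo)
--     for i in range(n):
--         kod = ord(slowo[i])
--         r = kod + 13 if kod <= 109 else kod - 13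
--         if r != ord(slowo[n - 1 - i]):
--             return False
--     return True
-- ===== Notes on version B (the rewrite author's own statement) =====
-- stated objective: alternative
-- what changed: B replaces A's build-ROT13-string/reverse/compare with a single index loop that compares the transformed code of slowo[i] directly against ord(slowo[n-1-i]) and exits early on the first mismatch, never building any string.
import Mathlib
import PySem

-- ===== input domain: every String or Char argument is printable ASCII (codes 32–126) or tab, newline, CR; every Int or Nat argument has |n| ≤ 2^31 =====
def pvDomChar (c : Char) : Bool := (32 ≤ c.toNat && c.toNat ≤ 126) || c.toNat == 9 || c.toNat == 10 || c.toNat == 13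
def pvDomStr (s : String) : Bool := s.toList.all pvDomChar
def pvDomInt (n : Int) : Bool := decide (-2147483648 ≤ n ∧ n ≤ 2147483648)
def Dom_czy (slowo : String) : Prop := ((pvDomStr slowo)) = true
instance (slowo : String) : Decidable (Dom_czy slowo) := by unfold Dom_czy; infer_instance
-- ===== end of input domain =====

-- B replaces A's build-ROT13-string / reverse / compare with a single index loop that
-- compares the transformed code of slowo[i] against ord(slowo[n-1-i]) with early exit;
-- no string is built (alternative decomposition, same asymptotic cost).

-- ===== PORT A =====
-- kod_rot is kept as a List Char (the Python string being built);
-- '+=' is append, '[::-1]' is reversal, '==' compares the character lists.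
def czy (slowo : String) : Bool :=
  let kodRot : List Char := slowo.toList.foldl (fun kodRot litera =>
    let kod : Int := litera.toNat
    if kod + 13 ≤ 122 then kodRot ++ [Char.ofNat (kod + 13).toNat]
    else kodRot ++ [Char.ofNat (97 + (12 - (122 - kod))).toNat]) []
  if kodRot.reverse = slowo.toList then true else false

-- ===== PORT B =====
-- the 'for i in range(n)' loop of Source B with its early 'return False'
def czyGo (l : List Char) (n i : Nat) : Bool :=
  if i < n then
    let kod : Int := (l.getD i ' ').toNat
    let r : Int := if kod ≤ 109 then kod + 13 else kod - 13
    if r ≠ ((l.getD (n - 1 - i) ' ').toNat : Int) then false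
    else czyGo l n (i + 1)
  else true
termination_by n - i

def czy_alt (slowo : String) : Bool := czyGo slowo.toList slowo.toList.length 0

-- ===== PRECONDITION & SPEC =====
def Spec_czy (slowo : String) (out : Bool) : Prop := out = czy_alt slowo
instance (slowo : String) (out : Bool) : Decidable (Spec_czy slowo out) := by unfold Spec_czy; infer_instance

-- ===== CLAIM (what is proved, stated in full; the proofs are below) =====
def Claim_equal_czy : Prop := ∀ (slowo : String), Dom_czy slowo → Spec_czy slowo (czy slowo)

-- ===== LEMMAS AND PROOFS =====

-- the per-character transform of A, as a character
def rotA (c : Char) : Char :=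
  if ((c.toNat : Int) + 13 ≤ 122) then Char.ofNat (((c.toNat : Int) + 13)).toNat
  else Char.ofNat ((97 + (12 - (122 - (c.toNat : Int))))).toNat

-- the per-character transform of B, as an integer code
def rotI (c : Char) : Int :=
  if (c.toNat : Int) ≤ 109 then (c.toNat : Int) + 13 else (c.toNat : Int) - 13

lemma toNat_ofNat_small (n : Nat) (h : n < 55296) : (Char.ofNat n).toNat = n := by
  simp [Char.ofNat, Char.toNat, Nat.isValidChar, h, Char.ofNatAux]

lemma char_eq_of_toNat_eq (a b : Char) (h : a.toNat = b.toNat) : a = b :=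
  Char.ext (UInt32.toNat_inj.mp h)

lemma czy_fold (l : List Char) (acc : List Char) :
    l.foldl (fun kodRot litera =>
      let kod : Int := litera.toNat
      if kod + 13 ≤ 122 then kodRot ++ [Char.ofNat (kod + 13).toNat]
      else kodRot ++ [Char.ofNat (97 + (12 - (122 - kod))).toNat]) acc
    = acc ++ l.map rotA := by
  induction l generalizing acc with
  | nil => simp
  | cons c t ih =>
    simp only [List.foldl_cons, List.map_cons, rotA]
    split <;> rw [ih] <;> simp

lemma rotA_toNat (c : Char) (h : c.toNat ≤ 126) : (((rotA c).toNat : Int)) = rotI c := by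
  unfold rotA rotI
  split_ifs with h1 h2 h2
  · rw [show (((c.toNat : Int) + 13)).toNat = c.toNat + 13 by omega,
      toNat_ofNat_small _ (by omega)]; push_cast; ring
  · omega
  · omega
  · rw [show ((97 + (12 - (122 - (c.toNat : Int))))).toNat = c.toNat - 13 by omega,
      toNat_ofNat_small _ (by omega)]; omega

lemma map_rev_iff (l : List Char) (hd : ∀ c ∈ l, c.toNat ≤ 126) :
    ((l.map rotA).reverse = l) ↔
      ∀ j, j < l.length →
        rotI (l.getD j ' ') = (((l.getD (l.length - 1 - j) ' ').toNat : Int)) := by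
  constructor
  · intro he j hj
    have key : ∀ i, i < l.length →
        rotI (l.getD (l.length - 1 - i) ' ') = (((l.getD i ' ').toNat : Int)) := by
      intro i hi
      have h1 : (List.map rotA l).reverse.getD i ' ' = l.getD i ' ' := by rw [he]
      rw [List.getD_eq_getElem _ _ (by simpa using hi), List.getD_eq_getElem _ _ hi,
        List.getElem_reverse, List.getElem_map] at h1
      simp only [List.length_map] at h1
      rw [List.getD_eq_getElem _ _ (show l.length - 1 - i < l.length by omega),
        List.getD_eq_getElem _ _ hi]
      have h2 := rotA_toNat (l[l.length - 1 - i]'(by omega)) (hd _ (List.getElem_mem _))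
      rw [← h2, h1]
    have hk := key (l.length - 1 - j) (by omega)
    rwa [show l.length - 1 - (l.length - 1 - j) = j by omega] at hk
  · intro hall
    apply List.ext_getElem (by simp)
    intro i hi hi'
    rw [List.getElem_reverse, List.getElem_map]
    simp only [List.length_map]
    have h := hall (l.length - 1 - i) (by omega)
    rw [show l.length - 1 - (l.length - 1 - i) = i by omega] at h
    rw [List.getD_eq_getElem _ _ (show l.length - 1 - i < l.length by omega),
      List.getD_eq_getElem _ _ hi'] at h
    have hrt := rotA_toNat (l[l.length - 1 - i]'(by omega)) (hd _ (List.getElem_mem _))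
    apply char_eq_of_toNat_eq
    have : ((rotA (l[l.length - 1 - i]'(by omega))).toNat : Int) = ((l[i].toNat : Int)) :=
      hrt.trans h
    exact_mod_cast this

lemma czyGo_iff : ∀ (k : Nat) (l : List Char) (n i : Nat), n - i ≤ k →
    (czyGo l n i = true ↔
      ∀ j, i ≤ j → j < n →
        rotI (l.getD j ' ') = (((l.getD (n - 1 - j) ' ').toNat : Int))) := by
  intro k
  induction k with
  | zero =>
    intro l n i hk
    rw [czyGo]
    have hlt : ¬ i < n := by omega
    rw [if_neg hlt]
    exact ⟨fun _ j h1 h2 => absurd h2 (by omega), fun _ => rfl⟩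
  | succ k ih =>
    intro l n i hk
    by_cases hlt : i < n
    · rw [czyGo]
      show ((if i < n then
          (if (if ((l.getD i ' ').toNat : Int) ≤ 109
                then ((l.getD i ' ').toNat : Int) + 13
                else ((l.getD i ' ').toNat : Int) - 13)
              ≠ (((l.getD (n - 1 - i) ' ').toNat : Int))
            then false else czyGo l n (i + 1))
          else true) = true) ↔ _
      rw [if_pos hlt]
      by_cases hne : (if ((l.getD i ' ').toNat : Int) ≤ 109
            then ((l.getD i ' ').toNat : Int) + 13
            else ((l.getD i ' ').toNat : Int) - 13)
          = (((l.getD (n - 1 - i) ' ').toNat : Int))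
      · rw [if_neg (not_not_intro hne), ih l n (i + 1) (by omega)]
        constructor
        · intro h j h1 h2
          rcases Nat.eq_or_lt_of_le h1 with rfl | h1'
          · simpa [rotI] using hne
          · exact h j h1' h2
        · intro h j h1 h2
          exact h j (by omega) h2
      · rw [if_pos hne]
        constructor
        · intro h; cases h
        · intro h; exact absurd (by simpa [rotI] using h i le_rfl hlt) hne
    · rw [czyGo]
      rw [if_neg hlt]
      exact ⟨fun _ j h1 h2 => absurd h2 (by omega), fun _ => rfl⟩

-- ===== VERDICT (by name: the statement is the Claim_ definition above) =====
theorem czy_spec : Claim_equal_czy := by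
  intro s hdom
  unfold Spec_czy czy czy_alt
  have hd : ∀ c ∈ s.toList, c.toNat ≤ 126 := by
    intro c hc
    have := (List.all_eq_true.mp hdom) c hc
    simp [pvDomChar] at this
    omega
  rw [czy_fold]
  simp only [List.nil_append]
  by_cases hc : (s.toList.map rotA).reverse = s.toList
  · rw [if_pos hc]
    exact ((czyGo_iff s.toList.length s.toList s.toList.length 0 le_rfl).mpr
      (fun j _ hj => (map_rev_iff s.toList hd).mp hc j hj)).symm
  · rw [if_neg hc]
    cases hB : czyGo s.toList s.toList.length 0
    · rfl
    · exact absurd ((map_rev_iff s.toList hd).mpr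
        (fun j hj => (czyGo_iff s.toList.length s.toList s.toList.length 0 le_rfl).mp
          hB j (Nat.zero_le _) hj)) hc
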